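-- pv_equiv track=rewrite | github.com/flopau76/phygTP1 | TP/kmers.py | encode_kmer
-- ===== SOURCE A (Python) =====
-- def encode_nucl(letter):
--     """ Encodes a nucleotide on two bits
--     using the ascii code"""
--     # encode = {'A': 0b00, 'C': 0b01, 'T': 0b10, 'G': 0b11}
--     return (ord(letter) >> 1) & 0b11
--
-- def encode_nucl_rev(letter):
--     """ Encodes the complementary of a nucleotide on two bits
--     using the ascii code"""
--     return encode_nucl(letter) ^ 0b10
--
-- def encode_kmer(seq, k):
--     """ Encodes the first kmer, and its reverse complementary """
--     kmer = 0
--     rev_kmer = 0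
--     for letter in seq[0:k]:
--         kmer <<= 2
--         kmer |= encode_nucl(letter)
--         rev_kmer >>= 2
--         rev_kmer |= encode_nucl_rev(letter) << (2*(k-1))
--     return kmer, rev_kmer
-- ===== SOURCE B (Python) =====
-- def encode_kmer(seq, k):
--     """Encodes the first kmer, and its reverse complementary."""
--     window = seq[0:k]
--     kmer = 0
--     for letter in window:
--         kmer = (kmer << 2) | ((ord(letter) >> 1) & 0b11)
--     rev_kmer = 0
--     for i in range(len(window)):
--         rev_kmer |= ((((kmer >> (2 * i)) & 0b11) ^ 0b10) << (2 * (k - 1 - i)))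
--     return kmer, rev_kmer
-- ===== Notes on version B (the rewrite author's own statement) =====
-- stated objective: alternative
-- what changed: B makes a single pass that packs only the k-mer, then derives the reverse complement from the packed integer itself — complementing each 2-bit group of kmer and OR-ing it into the mirrored slot of the k-slot window — instead of accumulating rev_kmer letter by letter with a shifting accumulator as A does.
import Mathlib
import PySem

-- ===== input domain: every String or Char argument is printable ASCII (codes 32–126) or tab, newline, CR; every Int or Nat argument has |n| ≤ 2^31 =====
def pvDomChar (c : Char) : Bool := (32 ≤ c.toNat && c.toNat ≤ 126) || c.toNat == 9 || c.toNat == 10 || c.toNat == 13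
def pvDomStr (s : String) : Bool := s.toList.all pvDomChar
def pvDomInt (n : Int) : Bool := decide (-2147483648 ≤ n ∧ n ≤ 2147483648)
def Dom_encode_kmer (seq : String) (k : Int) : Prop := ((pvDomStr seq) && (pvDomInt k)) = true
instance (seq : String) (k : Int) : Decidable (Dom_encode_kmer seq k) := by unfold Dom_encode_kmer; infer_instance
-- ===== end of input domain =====

-- B (alternative, same cost): one pass packs only the k-mer; the reverse complement is then
-- derived from the packed integer itself — 2-bit group i of kmer, complemented, is placed at
-- slot k-1-i of the k-slot window — instead of being accumulated letter by letter as in A.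

-- ===== PORT A =====
def encode_nucl (letter : Char) : Int :=
  (((letter.toNat >>> 1) &&& 3 : Nat) : Int)   -- (ord(letter) >> 1) & 0b11

def encode_nucl_rev (letter : Char) : Int :=
  PySem.Int.bxor (encode_nucl letter) 2        -- encode_nucl(letter) ^ 0b10

-- The shift amount 2*(k-1) is nonnegative whenever the loop body runs on an input admitted by
-- Pre_encode_kmer (Python raises ValueError on a negative shift; Pre_ excludes exactly those
-- inputs), so `.toNat` is exact there.
def encode_kmer (seq : String) (k : Int) : Int × Int :=
  (PySem.List.slice seq.toList (some 0) (some k)).foldl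
    (fun (st : Int × Int) letter =>
      (PySem.Int.bor (st.1 <<< (2 : Nat)) (encode_nucl letter),
       PySem.Int.bor (st.2 >>> (2 : Nat)) (encode_nucl_rev letter <<< (2 * (k - 1)).toNat)))
    ((0, 0) : Int × Int)

-- ===== PORT B =====
-- The shift amounts 2*i (i from range(len(window))) and 2*(k-1-i) are nonnegative on every input
-- admitted by Pre_encode_kmer (B's Python, like A's, raises ValueError on a negative shift count
-- exactly when k < 0 and the window is nonempty), so `.toNat` is exact there.
def encode_kmer_alt (seq : String) (k : Int) : Int × Int :=
  let window := PySem.List.slice seq.toList (some 0) (some k)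
  let kmer := window.foldl
    (fun (km : Int) letter =>
      PySem.Int.bor (km <<< (2 : Nat)) (((letter.toNat >>> 1) &&& 3 : Nat) : Int))
    (0 : Int)
  let rev := (PySem.List.pyRange 0 (window.length : Int) 1).foldl
    (fun (rv : Int) (i : Int) =>
      PySem.Int.bor rv
        ((PySem.Int.bxor (PySem.Int.band (kmer >>> (2 * i).toNat) 3) 2)
          <<< (2 * (k - 1 - i)).toNat))
    (0 : Int)
  (kmer, rev)

-- ===== PRECONDITION & SPEC =====
-- Pre_ excludes exactly the inputs (k < 0 with len(seq) > -k) on which A's loop body executes a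
-- shift by the negative amount 2*(k-1) and Python raises ValueError; A returns on every other input.
def Pre_encode_kmer (seq : String) (k : Int) : Prop :=
  0 ≤ k ∨ (seq.toList.length : Int) + k ≤ 0
instance (seq : String) (k : Int) : Decidable (Pre_encode_kmer seq k) := by
  unfold Pre_encode_kmer; infer_instance

def pvWitness_encode_kmer : String × Int := ("ACGT", 4)

def Spec_encode_kmer (seq : String) (k : Int) (out : Int × Int) : Prop := out = encode_kmer_alt seq k
instance (seq : String) (k : Int) (out : Int × Int) : Decidable (Spec_encode_kmer seq k out) := by
  unfold Spec_encode_kmer; infer_instance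

-- ===== CLAIM (what is proved, stated in full; the proofs are below) =====
def Claim_equal_encode_kmer : Prop := ∀ (seq : String) (k : Int), Dom_encode_kmer seq k → Pre_encode_kmer seq k → Spec_encode_kmer seq k (encode_kmer seq k)

-- ===== LEMMAS AND PROOFS =====

-- 2-bit code of a letter, and of its complement, at the Nat level
def pvEnc (c : Char) : Nat := (c.toNat >>> 1) &&& 3
def pvEncR (c : Char) : Nat := pvEnc c ^^^ 2

-- little-endian value of a letter list under a 2-bit code (head = lowest 2-bit group)
def pvVal (f : Char → Nat) : List Char → Nat
  | [] => 0
  | c :: t => f c + 4 * pvVal f t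

theorem pvEnc_lt (c : Char) : pvEnc c < 4 := by
  have h : pvEnc c ≤ 3 := Nat.and_le_right
  omega

theorem pvEncR_lt (c : Char) : pvEncR c < 4 := by
  have h := pvEnc_lt c
  unfold pvEncR
  set e := pvEnc c with he
  interval_cases e <;> decide

theorem pvVal_lt (f : Char → Nat) (hf : ∀ c, f c < 4) :
    ∀ cs : List Char, pvVal f cs < 4 ^ cs.length := by
  intro cs
  induction cs with
  | nil => simp [pvVal]
  | cons c t ih =>
    have := hf c
    simp only [pvVal, List.length_cons, pow_succ]
    omega

theorem pvVal_append (f : Char → Nat) (cs : List Char) (c : Char) :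
    pvVal f (cs ++ [c]) = pvVal f cs + f c * 4 ^ cs.length := by
  induction cs with
  | nil => simp [pvVal]
  | cons d t ih => simp only [List.cons_append, pvVal, ih, List.length_cons, pow_succ]; ring

-- disjoint OR is addition: if e fits in the s low bits, (a * 2^s) ||| e = a * 2^s + e
theorem pvLorAdd : ∀ s a e : Nat, e < 2 ^ s → (a * 2 ^ s) ||| e = a * 2 ^ s + e := by
  intro s
  induction s with
  | zero =>
    intro a e he
    interval_cases e
    simp
  | succ s ih =>
    intro a e he
    have hpow : 2 ^ (s + 1) = 2 * 2 ^ s := by ring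
    have hb : e % 2 = 0 ∨ e % 2 = 1 := by omega
    have hdecomp : Nat.bit (decide (e % 2 = 1)) (e / 2) = e := by
      rcases hb with h | h <;> simp [Nat.bit_val, h] <;> omega
    have h2 : a * 2 ^ (s + 1) = Nat.bit false (a * 2 ^ s) := by
      simp [Nat.bit_val]; ring
    have he2 : e / 2 < 2 ^ s := by omega
    rw [← hdecomp, h2, Nat.lor_bit, ih a (e / 2) he2]
    simp only [Bool.false_or, Nat.bit_val]
    rcases hb with h | h <;> simp [h] <;> omega

theorem pvLor4 (a e : Nat) (he : e < 4) : (a <<< 2) ||| e = 4 * a + e := by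
  rw [Nat.shiftLeft_eq, pvLorAdd 2 a e (by omega)]
  ring

theorem pvLorHigh (x e s : Nat) (hx : x < 2 ^ s) : x ||| (e <<< s) = e * 2 ^ s + x := by
  rw [Nat.lor_comm, Nat.shiftLeft_eq, pvLorAdd s e x hx]

-- OR distributes over a common left shift
theorem pvOrShift (a b s : Nat) : (a <<< s) ||| (b <<< s) = (a ||| b) <<< s := by
  apply Nat.eq_of_testBit_eq
  intro i
  simp only [Nat.testBit_or, Nat.testBit_shiftLeft]
  cases hs : decide (s ≤ i) <;> simp

theorem encode_nucl_eq (c : Char) : encode_nucl c = ((pvEnc c : Nat) : Int) := rfl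

theorem encode_nucl_rev_eq (c : Char) : encode_nucl_rev c = ((pvEncR c : Nat) : Int) := by
  rw [encode_nucl_rev, encode_nucl_eq, show (2 : Int) = ((2 : Nat) : Int) from rfl,
    PySem.Int.bxor_natCast]
  rfl

-- characterization of A's loop: kmer is the big-endian value, rev_kmer the little-endian
-- complement value shifted to the top of the 2k-bit window
theorem pvFoldA (k : Int) :
    ∀ cs : List Char, (cs.length : Int) ≤ k →
      cs.foldl
        (fun (st : Int × Int) letter =>
          (PySem.Int.bor (st.1 <<< (2 : Nat)) (encode_nucl letter),
           PySem.Int.bor (st.2 >>> (2 : Nat)) (encode_nucl_rev letter <<< (2 * (k - 1)).toNat)))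
        ((0, 0) : Int × Int)
      = (((pvVal pvEnc cs.reverse : Nat) : Int),
         ((pvVal pvEncR cs * 4 ^ (k - cs.length).toNat : Nat) : Int)) := by
  intro cs
  induction cs using List.reverseRecOn with
  | nil => intro _; simp [pvVal]
  | append_singleton t c ih =>
    intro h
    have hlen : ((t.length : Int)) + 1 ≤ k := by
      simpa [List.length_append] using h
    rw [List.foldl_append, ih (by omega)]
    simp only [List.foldl_cons, List.foldl_nil]
    set n := t.length with hn
    set m := (k - (n : Int)).toNat with hm
    have hm1 : 1 ≤ m := by omega
    simp only [Prod.mk.injEq]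
    constructor
    · -- kmer component
      rw [encode_nucl_eq, ← Int.natCast_shiftLeft, PySem.Int.bor_natCast]
      rw [pvLor4 _ _ (pvEnc_lt c)]
      simp [pvVal]
      omega
    · -- rev_kmer component
      set R := pvVal pvEncR t with hR
      have hsplit : R * 4 ^ m = (R * 4 ^ (m - 1)) * 4 := by
        have : 4 ^ m = 4 ^ (m - 1) * 4 := by
          rw [← pow_succ]
          congr 1
          omega
        rw [this]; ring
      rw [← Int.natCast_shiftRight, Nat.shiftRight_eq_div_pow, hsplit,
        show (2 : Nat) ^ 2 = 4 from rfl, Nat.mul_div_cancel _ (by omega)]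
      rw [encode_nucl_rev_eq, ← Int.natCast_shiftLeft, PySem.Int.bor_natCast]
      have hs : (2 * (k - 1)).toNat = 2 * (k - 1).toNat := by omega
      have hRlt : R < 4 ^ n := pvVal_lt pvEncR pvEncR_lt t
      have hxlt : R * 4 ^ (m - 1) < 2 ^ (2 * (k - 1).toNat) := by
        have hpow : (2 : Nat) ^ (2 * (k - 1).toNat) = 4 ^ (k - 1).toNat := by
          rw [pow_mul]; norm_num
        have he : (k - 1).toNat = n + (m - 1) := by omega
        rw [hpow, he, pow_add]
        have h4 : 0 < (4 : Nat) ^ (m - 1) := by positivity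
        calc R * 4 ^ (m - 1) < 4 ^ n * 4 ^ (m - 1) := by
              exact Nat.mul_lt_mul_of_lt_of_le hRlt (le_refl _) h4
          _ = 4 ^ n * 4 ^ (m - 1) := rfl
      rw [hs, pvLorHigh _ _ _ hxlt]
      have htgt : (k - ((t ++ [c]).length : Int)).toNat = m - 1 := by
        simp only [List.length_append, List.length_cons, List.length_nil]
        omega
      rw [pvVal_append, htgt]
      congr 1
      have hpow : (2 : Nat) ^ (2 * (k - 1).toNat) = 4 ^ n * 4 ^ (m - 1) := by
        rw [pow_mul, show ((2:Nat)^2) = 4 from rfl, ← pow_add]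
        congr 1
        omega
      rw [hpow]
      ring

-- characterization of B's first loop: the same big-endian kmer
theorem pvFoldB1 :
    ∀ cs : List Char,
      cs.foldl
        (fun (km : Int) letter =>
          PySem.Int.bor (km <<< (2 : Nat)) (((letter.toNat >>> 1) &&& 3 : Nat) : Int))
        (0 : Int)
      = ((pvVal pvEnc cs.reverse : Nat) : Int) := by
  intro cs
  induction cs using List.reverseRecOn with
  | nil => simp [pvVal]
  | append_singleton t c ih =>
    rw [List.foldl_append, ih]
    simp only [List.foldl_cons, List.foldl_nil]
    rw [← Int.natCast_shiftLeft, show (((c.toNat >>> 1) &&& 3 : Nat) : Int) = ((pvEnc c : Nat) : Int) from rfl]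
    rw [PySem.Int.bor_natCast, pvLor4 _ _ (pvEnc_lt c)]
    simp [pvVal]
    omega

-- the i-th 2-bit group of the little-endian value is the code of the i-th letter
theorem pvExtract :
    ∀ (ys : List Char) (i : Nat) (hi : i < ys.length),
      (pvVal pvEnc ys >>> (2 * i)) &&& 3 = pvEnc ys[i] := by
  intro ys
  induction ys with
  | nil => intro i hi; simp at hi
  | cons c t ih =>
    intro i hi
    match i with
    | 0 =>
      simp only [pvVal, Nat.mul_zero, Nat.shiftRight_zero, List.getElem_cons_zero]
      rw [show (3 : Nat) = 2 ^ 2 - 1 from rfl, Nat.and_two_pow_sub_one_eq_mod]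
      have := pvEnc_lt c
      omega
    | j + 1 =>
      have hj : j < t.length := by simpa using hi
      have hstep : (pvVal pvEnc (c :: t)) >>> (2 * (j + 1)) = (pvVal pvEnc t) >>> (2 * j) := by
        rw [show 2 * (j + 1) = 2 + 2 * j by ring, Nat.shiftRight_add]
        congr 1
        rw [Nat.shiftRight_eq_div_pow, show (2:Nat) ^ 2 = 4 from rfl]
        simp only [pvVal]
        have := pvEnc_lt c
        omega
      rw [hstep, ih j hj]
      simp

-- characterization of B's second loop: placing the complemented 2-bit groups of kmer at the
-- mirrored slots of the k-slot window rebuilds A's rev_kmer value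
theorem pvFoldB2 (k : Int) (ys : List Char) (hk : (ys.length : Int) ≤ k) :
    ∀ m, m ≤ ys.length →
      (List.range m).foldl
        (fun (rv : Int) (i : Nat) =>
          PySem.Int.bor rv
            ((PySem.Int.bxor
                (PySem.Int.band (((pvVal pvEnc ys : Nat) : Int) >>> (2 * ((i : Nat) : Int)).toNat) 3) 2)
              <<< (2 * (k - 1 - ((i : Nat) : Int))).toNat))
        (0 : Int)
      = ((pvVal pvEncR ((ys.take m).reverse) * 4 ^ (k - m).toNat : Nat) : Int) := by
  intro m
  induction m with
  | zero => intro _; simp [pvVal]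
  | succ m ih =>
    intro hm
    have hmlt : m < ys.length := by omega
    rw [List.range_succ, List.foldl_append, ih (by omega)]
    simp only [List.foldl_cons, List.foldl_nil]
    have htn : (2 * ((m : Nat) : Int)).toNat = 2 * m := by omega
    rw [htn, ← Int.natCast_shiftRight, show (3 : Int) = ((3 : Nat) : Int) from rfl,
      PySem.Int.band_natCast, pvExtract ys m hmlt]
    have hx : PySem.Int.bxor ((pvEnc ys[m] : Nat) : Int) 2 = ((pvEncR ys[m] : Nat) : Int) := by
      rw [show (2 : Int) = ((2 : Nat) : Int) from rfl, PySem.Int.bxor_natCast]; rfl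
    rw [hx]
    have hsh : (2 * (k - 1 - ((m : Nat) : Int))).toNat = 2 * (k - 1 - m).toNat := by omega
    rw [hsh, ← Int.natCast_shiftLeft, PySem.Int.bor_natCast]
    -- Nat-level: Vm * 4^(K+1) ||| e <<< 2K = (4*Vm + e) * 4^K with K = (k-1-m).toNat
    set Vm := pvVal pvEncR ((ys.take m).reverse) with hVm
    set e := pvEncR ys[m] with he
    set K := (k - 1 - (m : Int)).toNat with hK
    have hKm : (k - (m : Int)).toNat = K + 1 := by omega
    have hKm1 : (k - (((m + 1 : Nat)) : Int)).toNat = K := by omega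
    have hleft : Vm * 4 ^ (k - (m : Int)).toNat = (4 * Vm) <<< (2 * K) := by
      rw [hKm, Nat.shiftLeft_eq, pow_mul, show ((2:Nat)^2) = 4 from rfl, pow_succ]
      ring
    have hright : e <<< (2 * K) = e <<< (2 * K) := rfl
    rw [hleft, pvOrShift]
    have hor : (4 * Vm) ||| e = 4 * Vm + e := by
      have := pvLor4 Vm e (pvEncR_lt ys[m])
      rw [Nat.shiftLeft_eq, show ((2:Nat)^2) = 4 from rfl, Nat.mul_comm] at this
      exact this
    rw [hor]
    congr 1
    have htake : ys.take (m + 1) = ys.take m ++ [ys[m]] := by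
      rw [List.take_add_one, List.getElem?_eq_getElem hmlt]
      rfl
    rw [htake, List.reverse_append, hKm1]
    simp only [List.reverse_cons, List.reverse_nil, List.nil_append, List.singleton_append, pvVal]
    rw [Nat.shiftLeft_eq, pow_mul, show ((2:Nat)^2) = 4 from rfl]
    ring

-- the slice seq[0:k] is empty whenever len(seq) + k ≤ 0
theorem pvSliceNil (xs : List Char) (k : Int) (hk : k < 0) (h : (xs.length : Int) + k ≤ 0) :
    PySem.List.slice xs (some 0) (some k) = [] := by
  rw [PySem.List.slice_zero_start]
  have hk' : k = -(((-k).toNat : Nat) : Int) := by omega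
  rw [hk', PySem.List.slice_to_neg_natCast xs (-k).toNat (by omega)]
  have : xs.length - (-k).toNat = 0 := by omega
  simp [this]

-- the slice seq[0:k] has at most k letters when 0 ≤ k
theorem pvSliceLen (xs : List Char) (k : Int) (hk : 0 ≤ k) :
    ((PySem.List.slice xs (some 0) (some k)).length : Int) ≤ k := by
  rw [PySem.List.slice_zero_start, PySem.List.slice_to xs hk]
  simp only [List.length_take]
  omega

-- ===== VERDICT (by name: the statement is the Claim_ definition above) =====
theorem encode_kmer_spec : Claim_equal_encode_kmer := by
  intro seq k _hdom hpre
  unfold Spec_encode_kmer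
  simp only [encode_kmer, encode_kmer_alt]
  set cs := PySem.List.slice seq.toList (some 0) (some k) with hcs
  by_cases hnil : cs = []
  · rw [hnil]
    simp
  · -- nonempty slice: Pre_ forces 0 ≤ k, hence length ≤ k
    have hk0 : 0 ≤ k := by
      by_contra hneg
      rcases hpre with h | h
      · omega
      · exact hnil (pvSliceNil seq.toList k (by omega) h)
    have hk : ((cs.length : Int)) ≤ k := pvSliceLen seq.toList k hk0
    rw [pvFoldA k cs hk, pvFoldB1 cs]
    simp only [Prod.mk.injEq]
    refine ⟨trivial, ?_⟩
    rw [PySem.List.pyRange_zero_nat, List.foldl_map]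
    have hk' : ((cs.reverse.length : Int)) ≤ k := by rwa [List.length_reverse]
    have h2 := pvFoldB2 k cs.reverse hk' cs.reverse.length (le_refl _)
    rw [List.take_length, List.reverse_reverse, List.length_reverse] at h2
    exact h2.symm
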